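-- pv_equiv track=rewrite | github.com/Asplund-Samuelsson/POPPY | mepmap_create.py | expand_start_comp_ids
-- ===== SOURCE A (Python) =====
-- def expand_start_comp_ids(comp_dict, start_comp_ids, extra_kegg_ids=[]):
--     """
--     Expands a set of start compound IDs with those of compounds sharing
--     the same KEGG ID.
--     """
--     start_kegg_ids = set(extra_kegg_ids)
--     for start_comp_id in start_comp_ids:
--         try:
--             start_comp = comp_dict[start_comp_id]
--         except KeyError:
--             # Missing start compound IDs missing is not optimal
--             # By-passing them here
--             continue
--         try:
--             kegg_ids = set(start_comp['DB_links']['KEGG'])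
--             start_kegg_ids = start_kegg_ids.union(kegg_ids)
--         except KeyError:
--             pass
--     for comp_id in comp_dict.keys():
--         comp = comp_dict[comp_id]
--         try:
--             if len(set(comp['DB_links']['KEGG']).intersection(start_kegg_ids)):
--                 start_comp_ids.add(comp_id)
--         except KeyError:
--             pass
--     return start_comp_ids
-- ===== SOURCE B (Python) =====
-- def expand_start_comp_ids(comp_dict, start_comp_ids, extra_kegg_ids=[]):
--     """
--     Expands a set of start compound IDs with those of compounds sharing
--     the same KEGG ID.  Index-based re-implementation: one pass builds an
--     inverted index kegg_id -> {comp_id}; matches are then found by lookup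
--     instead of intersecting every compound's KEGG set with the start set.
--     (Mutates and returns start_comp_ids, like the original.)
--     """
--     # Inverted index: KEGG ID -> set of compound IDs carrying it
--     index = {}
--     for comp_id, comp in comp_dict.items():
--         try:
--             for kegg_id in comp['DB_links']['KEGG']:
--                 index.setdefault(kegg_id, set()).add(comp_id)
--         except KeyError:
--             pass
--     # KEGG IDs of the start compounds (missing compounds/links are skipped)
--     start_kegg_ids = set(extra_kegg_ids)
--     for start_comp_id in start_comp_ids:
--         try:
--             start_kegg_ids = start_kegg_ids.union(
--                 set(comp_dict[start_comp_id]['DB_links']['KEGG']))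
--         except KeyError:
--             pass
--     # Compound IDs sharing a start KEGG ID, by index lookup
--     matched = set()
--     for kegg_id in start_kegg_ids:
--         matched |= index.get(kegg_id, set())
--     for comp_id in comp_dict:
--         if comp_id in matched:
--             start_comp_ids.add(comp_id)
--     return start_comp_ids
-- ===== Notes on version B (the rewrite author's own statement) =====
-- stated objective: alternative
-- what changed: B builds an inverted index (KEGG id -> set of compound ids) in one pass and finds the compounds to add by index lookup over the start KEGG ids, instead of A's second pass that intersects every compound's KEGG set with the start KEGG set.
import Mathlib
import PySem

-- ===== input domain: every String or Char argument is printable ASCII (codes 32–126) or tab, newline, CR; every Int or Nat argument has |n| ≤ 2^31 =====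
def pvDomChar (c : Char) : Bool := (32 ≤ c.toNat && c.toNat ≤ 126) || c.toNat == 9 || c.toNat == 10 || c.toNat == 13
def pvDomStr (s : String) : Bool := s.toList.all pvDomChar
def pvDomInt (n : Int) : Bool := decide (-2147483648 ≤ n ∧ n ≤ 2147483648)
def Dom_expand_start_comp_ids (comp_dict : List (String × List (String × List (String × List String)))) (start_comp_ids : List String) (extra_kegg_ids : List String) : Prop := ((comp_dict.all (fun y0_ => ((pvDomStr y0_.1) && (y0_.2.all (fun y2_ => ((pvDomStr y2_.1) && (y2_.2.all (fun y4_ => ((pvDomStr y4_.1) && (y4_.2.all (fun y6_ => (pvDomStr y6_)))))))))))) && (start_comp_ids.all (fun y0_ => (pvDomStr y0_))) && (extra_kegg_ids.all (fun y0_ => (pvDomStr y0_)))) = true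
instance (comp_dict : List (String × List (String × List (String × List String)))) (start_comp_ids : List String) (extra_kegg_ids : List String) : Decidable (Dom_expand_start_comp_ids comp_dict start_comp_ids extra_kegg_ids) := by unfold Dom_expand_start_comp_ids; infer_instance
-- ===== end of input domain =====

-- B replaces A's second scan-and-intersect pass by an inverted index (KEGG id -> compound ids)
-- built in one pass, so membership replaces per-compound set intersections (objective: alternative).
-- Both Pythons mutate and return the start_comp_ids set; the equivalence here is about the returned value.

-- ===== PORT A =====
-- comp['DB_links']['KEGG'] with its KeyError propagation (this subexpression is literal in both Pythons)
def keggLookup (comp : List (String × List (String × List String))) : Option (List String) :=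
  match (PySem.Dict.mk comp).get? "DB_links" with
  | none => none
  | some db => (PySem.Dict.mk db).get? "KEGG"

def expand_start_comp_ids (comp_dict : List (String × List (String × List (String × List String)))) (start_comp_ids : List String) (extra_kegg_ids : List String) : List String :=
  let start_kegg_ids : PySem.Set String :=
    start_comp_ids.foldl (fun sk start_comp_id =>
      match (PySem.Dict.mk comp_dict).get? start_comp_id with
      | none => sk              -- except KeyError: continue
      | some start_comp =>
        match keggLookup start_comp with
        | none => sk            -- except KeyError: pass
        | some kegg_ids => PySem.Set.union sk (PySem.Set.ofList kegg_ids))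
      (PySem.Set.ofList extra_kegg_ids)
  ((PySem.Dict.mk comp_dict).keys).foldl (fun acc comp_id =>
    match (PySem.Dict.mk comp_dict).get? comp_id with
    | none => acc               -- unreachable: comp_id comes from keys()
    | some comp =>
      match keggLookup comp with
      | none => acc             -- except KeyError: pass
      | some ks =>
        -- if len(set(ks).intersection(start_kegg_ids)):
        if (PySem.Set.inter (PySem.Set.ofList ks) start_kegg_ids).length ≠ 0
        then PySem.Set.add acc comp_id else acc)
    start_comp_ids

-- ===== PORT B =====
def expand_start_comp_ids_alt (comp_dict : List (String × List (String × List (String × List String)))) (start_comp_ids : List String) (extra_kegg_ids : List String) : List String :=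
  -- inverted index: KEGG ID -> set of compound IDs carrying it
  let index : PySem.Dict String (PySem.Set String) :=
    comp_dict.foldl (fun idx p =>
      match keggLookup p.2 with
      | none => idx             -- except KeyError: pass
      | some ks => ks.foldl (fun idx kegg_id =>
          -- index.setdefault(kegg_id, set()).add(comp_id)
          PySem.Dict.modify idx kegg_id PySem.Set.empty (fun s => PySem.Set.add s p.1)) idx)
      PySem.Dict.empty
  let start_kegg_ids : PySem.Set String :=
    start_comp_ids.foldl (fun sk start_comp_id =>
      match ((PySem.Dict.mk comp_dict).get? start_comp_id).bind keggLookup with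
      | none => sk              -- except KeyError: pass
      | some kegg_ids => PySem.Set.union sk (PySem.Set.ofList kegg_ids))
      (PySem.Set.ofList extra_kegg_ids)
  let matched : PySem.Set String :=
    start_kegg_ids.foldl (fun m kegg_id =>
      PySem.Set.union m (index.getD kegg_id PySem.Set.empty)) PySem.Set.empty
  comp_dict.foldl (fun acc p =>
    if p.1 ∈ matched then PySem.Set.add acc p.1 else acc) start_comp_ids

-- ===== PRECONDITION & SPEC =====
-- Pre_ excludes association lists carrying a duplicate key at any dict level: on those the List
-- encoding's first-match lookup and Python's dict construction (last value wins) diverge, so A's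
-- value there is an accident of the encoding (a defensible-corner exclusion, not a behaviour of A).
def Pre_expand_start_comp_ids (comp_dict : List (String × List (String × List (String × List String)))) (start_comp_ids : List String) (extra_kegg_ids : List String) : Prop :=
  (comp_dict.map Prod.fst).Nodup ∧
  ∀ p ∈ comp_dict, (p.2.map Prod.fst).Nodup ∧ ∀ q ∈ p.2, (q.2.map Prod.fst).Nodup
instance (comp_dict : List (String × List (String × List (String × List String)))) (start_comp_ids : List String) (extra_kegg_ids : List String) : Decidable (Pre_expand_start_comp_ids comp_dict start_comp_ids extra_kegg_ids) := by unfold Pre_expand_start_comp_ids; infer_instance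

def pvWitness_expand_start_comp_ids : (List (String × List (String × List (String × List String)))) × List String × List String :=
  ([("C1", [("DB_links", [("KEGG", ["K1"])])]), ("C2", [("DB_links", [("KEGG", ["K1", "K2"])])])], ["C1"], ["K9"])

def Spec_expand_start_comp_ids (comp_dict : List (String × List (String × List (String × List String)))) (start_comp_ids : List String) (extra_kegg_ids : List String) (out : List String) : Prop := out = expand_start_comp_ids_alt comp_dict start_comp_ids extra_kegg_ids
instance (comp_dict : List (String × List (String × List (String × List String)))) (start_comp_ids : List String) (extra_kegg_ids : List String) (out : List String) : Decidable (Spec_expand_start_comp_ids comp_dict start_comp_ids extra_kegg_ids out) := by unfold Spec_expand_start_comp_ids; infer_instance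

-- ===== CLAIM (what is proved, stated in full; the proofs are below) =====
def Claim_equal_expand_start_comp_ids : Prop := ∀ (comp_dict : List (String × List (String × List (String × List String)))) (start_comp_ids : List String) (extra_kegg_ids : List String), Dom_expand_start_comp_ids comp_dict start_comp_ids extra_kegg_ids → Pre_expand_start_comp_ids comp_dict start_comp_ids extra_kegg_ids → Spec_expand_start_comp_ids comp_dict start_comp_ids extra_kegg_ids (expand_start_comp_ids comp_dict start_comp_ids extra_kegg_ids)

-- ===== LEMMAS AND PROOFS =====

-- membership in the inner setdefault/add fold of B's index construction
theorem inner_fold_mem (c : String) (ks : List String) (d : PySem.Dict String (PySem.Set String)) (x k : String) :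
    x ∈ (ks.foldl (fun idx kegg_id => PySem.Dict.modify idx kegg_id PySem.Set.empty (fun s => PySem.Set.add s c)) d).getD k PySem.Set.empty
    ↔ x ∈ d.getD k PySem.Set.empty ∨ (x = c ∧ k ∈ ks) := by
  induction ks generalizing d with
  | nil => simp
  | cons k0 ks ih =>
    simp only [List.foldl_cons, ih, PySem.Dict.getD_modify, List.mem_cons]
    by_cases hk : k = k0
    · subst hk; simp [PySem.Set.mem_add]; tauto
    · simp only [if_neg hk]; tauto

-- membership in B's inverted index
theorem index_mem (l : List (String × List (String × List (String × List String)))) (d : PySem.Dict String (PySem.Set String)) (x k : String) :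
    x ∈ (l.foldl (fun idx p =>
        match keggLookup p.2 with
        | none => idx
        | some ks => ks.foldl (fun idx kegg_id =>
            PySem.Dict.modify idx kegg_id PySem.Set.empty (fun s => PySem.Set.add s p.1)) idx) d).getD k PySem.Set.empty
    ↔ x ∈ d.getD k PySem.Set.empty ∨ ∃ p ∈ l, ∃ ks, keggLookup p.2 = some ks ∧ x = p.1 ∧ k ∈ ks := by
  induction l generalizing d with
  | nil => simp
  | cons p l ih =>
    simp only [List.foldl_cons, List.mem_cons]
    cases h : keggLookup p.2 with
    | none =>
      rw [ih]
      constructor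
      · rintro (hm | ⟨q, hq, hrest⟩)
        · exact Or.inl hm
        · exact Or.inr ⟨q, Or.inr hq, hrest⟩
      · rintro (hm | ⟨q, (rfl | hq), ks, hks, hrest⟩)
        · exact Or.inl hm
        · rw [h] at hks; cases hks
        · exact Or.inr ⟨q, hq, ks, hks, hrest⟩
    | some ks0 =>
      rw [ih, inner_fold_mem]
      constructor
      · rintro ((hm | ⟨rfl, hk⟩) | ⟨q, hq, hrest⟩)
        · exact Or.inl hm
        · exact Or.inr ⟨p, Or.inl rfl, ks0, h, rfl, hk⟩
        · exact Or.inr ⟨q, Or.inr hq, hrest⟩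
      · rintro (hm | ⟨q, (rfl | hq), ks, hks, hx, hk⟩)
        · exact Or.inl (Or.inl hm)
        · rw [h] at hks; cases hks; exact Or.inl (Or.inr ⟨hx, hk⟩)
        · exact Or.inr ⟨q, hq, ks, hks, hx, hk⟩

-- membership in B's matched set
theorem matched_mem (index : PySem.Dict String (PySem.Set String)) (sk : List String) (m : PySem.Set String) (x : String) :
    x ∈ sk.foldl (fun m kegg_id => PySem.Set.union m (index.getD kegg_id PySem.Set.empty)) m
    ↔ x ∈ m ∨ ∃ k ∈ sk, x ∈ index.getD k PySem.Set.empty := by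
  induction sk generalizing m with
  | nil => simp
  | cons k sk ih =>
    simp only [List.foldl_cons, ih, PySem.Set.mem_union, List.mem_cons]
    constructor
    · rintro ((hm | hk) | ⟨k', hk', hx⟩)
      · exact Or.inl hm
      · exact Or.inr ⟨k, Or.inl rfl, hk⟩
      · exact Or.inr ⟨k', Or.inr hk', hx⟩
    · rintro (hm | ⟨k', (rfl | hk'), hx⟩)
      · exact Or.inl (Or.inl hm)
      · exact Or.inl (Or.inr hx)
      · exact Or.inr ⟨k', hk', hx⟩

-- under unique top-level keys, a pair's value is determined by its key
theorem key_unique {l : List (String × List (String × List (String × List String)))} (hnd : (l.map Prod.fst).Nodup)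
    {p q : String × List (String × List (String × List String))} (hp : p ∈ l) (hq : q ∈ l) (hk : p.1 = q.1) : p.2 = q.2 := by
  have h1 : (PySem.Dict.mk l).get? p.1 = some p.2 :=
    PySem.Dict.get?_of_mem_items (PySem.Dict.mk l) hp (by simpa using hnd)
  have h2 : (PySem.Dict.mk l).get? q.1 = some q.2 :=
    PySem.Dict.get?_of_mem_items (PySem.Dict.mk l) hq (by simpa using hnd)
  rw [hk, h2] at h1
  exact (Option.some.inj h1).symm

-- the second phase of A (scan keys, intersect) equals the second phase of B (index lookups)
theorem second_phase (l : List (String × List (String × List (String × List String)))) (hnd : (l.map Prod.fst).Nodup) (sk : PySem.Set String) (acc : List String) :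
    ((PySem.Dict.mk l).keys).foldl (fun acc comp_id =>
      match (PySem.Dict.mk l).get? comp_id with
      | none => acc
      | some comp =>
        match keggLookup comp with
        | none => acc
        | some ks =>
          if (PySem.Set.inter (PySem.Set.ofList ks) sk).length ≠ 0
          then PySem.Set.add acc comp_id else acc) acc
    = l.foldl (fun acc p =>
        if p.1 ∈ sk.foldl (fun m kegg_id =>
            PySem.Set.union m ((l.foldl (fun idx p =>
              match keggLookup p.2 with
              | none => idx
              | some ks => ks.foldl (fun idx kegg_id =>
                  PySem.Dict.modify idx kegg_id PySem.Set.empty (fun s => PySem.Set.add s p.1)) idx)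
              PySem.Dict.empty).getD kegg_id PySem.Set.empty)) PySem.Set.empty
        then PySem.Set.add acc p.1 else acc) acc := by
  rw [PySem.Dict.keys_mk, List.foldl_map]
  apply PySem.List.foldl_congr_mem
  intro acc p hp
  have hget : (PySem.Dict.mk l).get? p.1 = some p.2 :=
    PySem.Dict.get?_of_mem_items (PySem.Dict.mk l) hp (by simpa using hnd)
  simp only [hget]
  cases hk : keggLookup p.2 with
  | none =>
    rw [if_neg]
    intro hmem
    rw [matched_mem] at hmem
    rcases hmem with h0 | ⟨k, _hks, hx⟩
    · simp at h0
    · rw [index_mem] at hx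
      rcases hx with h0 | ⟨q, hq, ks', hks', hxq, _⟩
      · simp [PySem.Dict.getD_empty] at h0
      · have := key_unique hnd hp hq hxq
        rw [this, hks'] at hk
        cases hk
  | some ks =>
    have hcond : ((PySem.Set.inter (PySem.Set.ofList ks) sk).length ≠ 0) ↔
        p.1 ∈ sk.foldl (fun m kegg_id =>
            PySem.Set.union m ((l.foldl (fun idx p =>
              match keggLookup p.2 with
              | none => idx
              | some ks => ks.foldl (fun idx kegg_id =>
                  PySem.Dict.modify idx kegg_id PySem.Set.empty (fun s => PySem.Set.add s p.1)) idx)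
              PySem.Dict.empty).getD kegg_id PySem.Set.empty)) PySem.Set.empty := by
      rw [Ne, List.length_eq_zero_iff, matched_mem]
      constructor
      · intro hne
        obtain ⟨x, hx⟩ := List.exists_mem_of_ne_nil _ hne
        rw [PySem.Set.mem_inter, PySem.Set.mem_ofList] at hx
        refine Or.inr ⟨x, hx.2, ?_⟩
        rw [index_mem]
        exact Or.inr ⟨p, hp, ks, hk, rfl, hx.1⟩
      · rintro (h0 | ⟨k, hksk, hx⟩)
        · simp at h0
        · rw [index_mem] at hx
          rcases hx with h0 | ⟨q, hq, ks', hks', hxq, hkks⟩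
          · simp [PySem.Dict.getD_empty] at h0
          · have heq := key_unique hnd hp hq hxq
            rw [heq, hks'] at hk
            cases hk
            intro hnil
            have : k ∈ PySem.Set.inter (PySem.Set.ofList ks) sk := by
              rw [PySem.Set.mem_inter, PySem.Set.mem_ofList]
              exact ⟨hkks, hksk⟩
            rw [hnil] at this
            exact absurd this (List.not_mem_nil)
    simp only [hcond]

-- ===== VERDICT (by name: the statement is the Claim_ definition above) =====
theorem expand_start_comp_ids_spec : Claim_equal_expand_start_comp_ids := by
  intro comp_dict start_comp_ids extra_kegg_ids _hdom hpre
  obtain ⟨hnd, -⟩ := hpre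
  unfold Spec_expand_start_comp_ids
  simp only [expand_start_comp_ids, expand_start_comp_ids_alt]
  have hsk : (fun (sk : PySem.Set String) start_comp_id =>
      match (PySem.Dict.mk comp_dict).get? start_comp_id with
      | none => sk
      | some start_comp =>
        match keggLookup start_comp with
        | none => sk
        | some kegg_ids => PySem.Set.union sk (PySem.Set.ofList kegg_ids)) =
      (fun (sk : PySem.Set String) start_comp_id =>
      match ((PySem.Dict.mk comp_dict).get? start_comp_id).bind keggLookup with
      | none => sk
      | some kegg_ids => PySem.Set.union sk (PySem.Set.ofList kegg_ids)) := by
    funext sk cid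
    cases (PySem.Dict.mk comp_dict).get? cid with
    | none => rfl
    | some comp => cases keggLookup comp <;> rfl
  rw [hsk]
  exact second_phase comp_dict hnd _ start_comp_ids
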